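-- pv_equiv track=rewrite | github.com/ltrujello/Monoidal_Coherence_and_Binary_Words | binary_word_Class/binary_word.py | is_surrounded
-- ===== SOURCE A (Python) =====
-- def parenthesis_tracker(word_expression, index=None):
--     ''' counts parenthesis-matches up to index. By default, index = length of the word.
--     '''
--     if index is None: # work-around of defining default param in terms of other param
--         index = len(word_expression)
--
--     assert index <= len(word_expression), "index tracker too large"
--     num_left_par=0  # number of left parenthesis
--     num_right_par=0 # number of right parenthesis
--     for ind in range(0, index):
--         letter = word_expression[ind]
--         if letter == "(": #if we find a left parenthesis
--             num_left_par+=1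
--         if letter == ")": #if we find a right parenthesis
--             num_right_par +=1
--     par_count = num_left_par - num_right_par
--     return par_count
--
-- def is_matched(word_expression, index=None):
--     '''Helper for is_surrounded.'''
--     '''A tool to figure out if the word has a correctly matched parenthesis up to desired index.
--        By default, the index is the length of the word.
--        A user has input and incorrect word if this is false when index = len(word_expression).
--     '''
--     if index is None: # work-around of defining default param in terms of other param
--         index = len(word_expression)
--     assert index>0, "Checking matched parenthesis at index = 0 is not logical."
--     par_count = parenthesis_tracker(word_expression, index)
--     if par_count != 0:
--         return False
--     else:
--         return True
--
-- def is_surrounded(word_expression):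
--     '''Helper for split_binary_word.'''
--     ''' Detects if the expression is already surrounded, or enclosed, in backets.
--     Some surrounded words: (x), (xx), (x(xx)), ...
--     '''
--     if word_expression == "x":
--         return False
--     assert is_matched(word_expression), "Mismatched parentheses in " + word_expression #at the very least, the whole word should be matched
--     for ind in range(1, len(word_expression)):
--         if is_matched(word_expression, ind): #if we find a set of closed brackets
--             return False #then the expression is not closed
--     return True
-- ===== SOURCE B (Python) =====
-- def is_surrounded(word_expression):
--     if word_expression == "x":
--         return False
--     balance = 0
--     for letter in word_expression[:-1]:
--         if letter == "(":
--             balance += 1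
--         elif letter == ")":
--             balance -= 1
--         if balance == 0:
--             return False
--     return True
-- ===== Notes on version B (the rewrite author's own statement) =====
-- stated objective: faster
-- what changed: B replaces A's quadratic scheme (recount the parenthesis balance from scratch for every prefix) with a single left-to-right pass keeping a running balance and returning False as soon as the balance hits zero at an intermediate position.
-- outside the precondition, e.g. on is_surrounded('('): A raises AssertionError, B returns True; on is_surrounded(')'): A raises AssertionError, B returns True; on is_surrounded(''): A raises AssertionError, B returns True
import Mathlib
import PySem

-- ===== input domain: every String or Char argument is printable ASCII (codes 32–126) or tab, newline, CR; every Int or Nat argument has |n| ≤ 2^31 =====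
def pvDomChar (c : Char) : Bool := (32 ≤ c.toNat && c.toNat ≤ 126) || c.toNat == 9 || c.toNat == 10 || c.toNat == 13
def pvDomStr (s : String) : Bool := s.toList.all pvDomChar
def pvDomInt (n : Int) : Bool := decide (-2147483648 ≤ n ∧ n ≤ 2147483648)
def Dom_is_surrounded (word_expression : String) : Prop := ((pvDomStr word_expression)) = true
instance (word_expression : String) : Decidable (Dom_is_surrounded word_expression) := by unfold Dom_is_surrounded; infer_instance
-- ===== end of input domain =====

-- B replaces A's quadratic per-prefix recount by one pass with a running balance (measured asymptotic speed-up).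


-- ===== PORT A =====
-- literal port of parenthesis_tracker (callers always pass 0 ≤ index ≤ len, so pyGetD's default is never read)
def parenthesis_tracker (word_expression : String) (index : Int) : Int :=
  let st := (PySem.List.pyRange 0 index 1).foldl
    (fun (st : Int × Int) ind =>
      let letter := PySem.List.pyGetD word_expression.toList ind ' '
      let nl := if letter = '(' then st.1 + 1 else st.1
      let nr := if letter = ')' then st.2 + 1 else st.2
      (nl, nr)) (0, 0)
  st.1 - st.2

def is_matched (word_expression : String) (index : Int) : Bool :=
  if parenthesis_tracker word_expression index ≠ 0 then false else true

-- A's asserts (balanced word, nonempty word) raise AssertionError; exactly those inputs are outside Pre_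
def is_surrounded (word_expression : String) : Bool :=
  if word_expression = "x" then false
  else
    -- for ind in range(1, len): if is_matched(…, ind): return False; return True
    (PySem.List.pyRange 1 (word_expression.toList.length : Int) 1).all
      (fun ind => !(is_matched word_expression ind))

-- ===== PORT B =====
def surroundedLoop : List Char → Int → Bool
  | [], _ => true
  | c :: rest, bal =>
    let bal' := if c = '(' then bal + 1 else if c = ')' then bal - 1 else bal
    if bal' = 0 then false else surroundedLoop rest bal'

def is_surrounded_alt (word_expression : String) : Bool :=
  if word_expression = "x" then false
  else surroundedLoop word_expression.toList.dropLast 0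

-- ===== PRECONDITION & SPEC =====
-- Pre_ excludes exactly the inputs on which A's asserts raise AssertionError: the empty word
-- (is_matched's index > 0 assert) and words with unequal '(' / ')' counts (the is_matched assert).
def Pre_is_surrounded (word_expression : String) : Prop :=
  word_expression = "x" ∨
    (word_expression.toList ≠ [] ∧
      word_expression.toList.count '(' = word_expression.toList.count ')')
instance (word_expression : String) : Decidable (Pre_is_surrounded word_expression) := by
  unfold Pre_is_surrounded; infer_instance

def pvWitness_is_surrounded : String := "(x(xx))"

def Spec_is_surrounded (word_expression : String) (out : Bool) : Prop := out = is_surrounded_alt word_expression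
instance (word_expression : String) (out : Bool) : Decidable (Spec_is_surrounded word_expression out) := by unfold Spec_is_surrounded; infer_instance

-- ===== CLAIM (what is proved, stated in full; the proofs are below) =====
def Claim_equal_is_surrounded : Prop := ∀ (word_expression : String), Dom_is_surrounded word_expression → Pre_is_surrounded word_expression → Spec_is_surrounded word_expression (is_surrounded word_expression)

-- ===== LEMMAS AND PROOFS =====

-- signed parenthesis balance of a prefix
def pvBal (l : List Char) : Int := (l.count '(' : Int) - (l.count ')' : Int)

lemma pt_fold (l : List Char) (m : Nat) (h : m ≤ l.length) :
    (PySem.List.pyRange 0 (m : Int) 1).foldl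
      (fun (st : Int × Int) ind =>
        let letter := PySem.List.pyGetD l ind ' '
        let nl := if letter = '(' then st.1 + 1 else st.1
        let nr := if letter = ')' then st.2 + 1 else st.2
        (nl, nr)) (0, 0)
    = (((l.take m).count '(' : Int), ((l.take m).count ')' : Int)) := by
  induction m with
  | zero => simp [PySem.List.pyRange_one_eq_nil]
  | succ k ih =>
      have hkl : k < l.length := h
      have hsplit : PySem.List.pyRange 0 ((k + 1 : Nat) : Int) 1
          = PySem.List.pyRange 0 (k : Nat) 1 ++ [(k : Int)] := by
        have hc : ((k + 1 : Nat) : Int) = (k : Int) + 1 := by push_cast; ring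
        rw [hc, PySem.List.pyRange_one_succ_right (by positivity)]
      have hget : PySem.List.pyGetD l (k : Int) ' ' = l[k] := by
        rw [PySem.List.pyGetD_natCast]
        simp [List.getElem?_eq_getElem hkl]
      have htake : l.take (k + 1) = l.take k ++ [l[k]] :=
        List.take_succ_eq_append_getElem hkl ▸ rfl
      rw [hsplit, List.foldl_append, ih (Nat.le_of_lt hkl)]
      simp only [List.foldl_cons, List.foldl_nil, hget, htake, List.count_append]
      by_cases h1 : l[k] = '(' <;> by_cases h2 : l[k] = ')' <;> simp_all

lemma pt_eq_bal (w : String) (m : Nat) (h : m ≤ w.toList.length) :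
    parenthesis_tracker w (m : Int) = pvBal (w.toList.take m) := by
  simp only [parenthesis_tracker]
  rw [pt_fold w.toList m h]
  rfl

lemma surroundedLoop_iff (l : List Char) (b : Int) :
    surroundedLoop l b = true ↔
      ∀ m : Nat, 1 ≤ m → m ≤ l.length → b + pvBal (l.take m) ≠ 0 := by
  induction l generalizing b with
  | nil => simp [surroundedLoop]; omega
  | cons c rest ih =>
      have hδ : ∀ m : Nat, pvBal ((c :: rest).take (m + 1))
          = (if c = '(' then (1:Int) else if c = ')' then -1 else 0) + pvBal (rest.take m) := by
        intro m
        simp only [List.take_succ_cons, pvBal, List.count_cons]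
        by_cases h1 : c = '(' <;> by_cases h2 : c = ')' <;> simp_all <;> push_cast <;> ring
      set δ : Int := if c = '(' then 1 else if c = ')' then -1 else 0 with hδdef
      have hstep : surroundedLoop (c :: rest) b
          = if b + δ = 0 then false else surroundedLoop rest (b + δ) := by
        by_cases h1 : c = '(' <;> by_cases h2 : c = ')' <;>
          simp_all [surroundedLoop] <;> ring_nf
      rw [hstep]
      by_cases hz : b + δ = 0
      · rw [if_pos hz]
        simp only [Bool.false_eq_true, false_iff]
        intro hall
        have h1 := hall 1 le_rfl (by simp)
        rw [show (1:Nat) = 0 + 1 from rfl, hδ 0] at h1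
        simp only [List.take_zero, pvBal, List.count_nil, Nat.cast_zero, sub_zero,
          add_zero] at h1
        exact h1 hz
      · rw [if_neg hz, ih (b + δ)]
        constructor
        · intro h m h1 h2
          obtain ⟨k, rfl⟩ := Nat.exists_eq_add_of_le h1
          rw [Nat.add_comm, hδ k]
          rcases Nat.eq_zero_or_pos k with hk | hk
          · subst hk
            simp only [List.take_zero, pvBal, List.count_nil, Nat.cast_zero, sub_zero,
              add_zero]
            exact hz
          · have h2' : k ≤ rest.length := by simp at h2; omega
            have hne := h k hk h2'
            intro hcon; apply hne; linarith
        · intro h k h1 h2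
          have hne := h (k + 1) (by omega) (by simpa using Nat.succ_le_succ h2)
          rw [hδ k] at hne
          intro hcon; apply hne; linarith

lemma take_dropLast' (l : List Char) (m : Nat) (h : m ≤ l.length - 1) :
    l.dropLast.take m = l.take m := by
  rw [List.dropLast_eq_take, List.take_take]
  congr 1
  omega

theorem is_surrounded_spec : Claim_equal_is_surrounded := by
  intro w _ hpre
  unfold Spec_is_surrounded
  by_cases hx : w = "x"
  · simp [is_surrounded, is_surrounded_alt, hx]
  · have hne : w.toList ≠ [] := by
      rcases hpre with h | ⟨h, _⟩
      · exact absurd h hx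
      · exact h
    have hlen : 1 ≤ w.toList.length := by
      cases hl : w.toList with
      | nil => exact absurd hl hne
      | cons a t => simp [hl]
    simp only [is_surrounded, is_surrounded_alt, if_neg hx]
    rw [Bool.eq_iff_iff, List.all_eq_true, surroundedLoop_iff]
    constructor
    · intro h m h1 h2
      have h2' : m ≤ w.toList.length - 1 := by simpa using h2
      have hm : ((m : Nat) : Int) ∈ PySem.List.pyRange 1 (w.toList.length : Int) 1 := by
        rw [PySem.List.mem_pyRange_one]
        constructor
        · exact_mod_cast h1
        · exact_mod_cast (by omega : m < w.toList.length)
      have hA := h _ hm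
      rw [take_dropLast' _ _ h2', Int.zero_add]
      simp only [Bool.not_eq_eq_eq_not, Bool.not_true, is_matched] at hA
      rw [pt_eq_bal w m (by omega)] at hA
      intro hcon
      simp [hcon] at hA
    · intro h ind hind
      rw [PySem.List.mem_pyRange_one] at hind
      obtain ⟨h1, h2⟩ := hind
      have hind' : ind = ((ind.toNat : Nat) : Int) := by omega
      have hm1 : 1 ≤ ind.toNat := by omega
      have hm2 : ind.toNat ≤ w.toList.length - 1 := by omega
      have hB := h ind.toNat hm1 (by simpa using hm2)
      rw [take_dropLast' _ _ hm2, Int.zero_add] at hB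
      rw [hind']
      simp only [Bool.not_eq_eq_eq_not, Bool.not_true, is_matched]
      rw [pt_eq_bal w ind.toNat (by omega)]
      simp [hB]
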